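-- pv_equiv track=rewrite | github.com/GGlinsek/programiranje-1 | Specops.py | koraki
-- ===== SOURCE A (Python) =====
-- def koraki(x, y, pot):
--     pot = list(pot)
--     pot_po_korakih = [(x, y)]
--     for korak in pot:
--         if korak == "v":
--             y += 1
--         elif korak == "^":
--             y -= 1
--         elif korak == ">":
--             x += 1
--         elif korak == "<":
--             x -= 1
--         pot_po_korakih.append((x, y))
--     return pot_po_korakih
-- ===== SOURCE B (Python) =====
-- DELTAS = {"v": (0, 1), "^": (0, -1), ">": (1, 0), "<": (-1, 0)}
--
-- def _prefix(start, ds):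
--     out = [start]
--     cur = start
--     for d in ds:
--         cur += d
--         out.append(cur)
--     return out
--
-- def koraki(x, y, pot):
--     deltas = [DELTAS.get(k, (0, 0)) for k in pot]
--     xs = _prefix(x, [d[0] for d in deltas])
--     ys = _prefix(y, [d[1] for d in deltas])
--     return list(zip(xs, ys))
-- ===== Notes on version B (the rewrite author's own statement) =====
-- stated objective: alternative
-- what changed: Replaces the branch-chain loop mutating (x,y) with a delta table keyed by the step character, two independent per-coordinate prefix-sum scans, and a final zip of the coordinate sequences.
import Mathlib
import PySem

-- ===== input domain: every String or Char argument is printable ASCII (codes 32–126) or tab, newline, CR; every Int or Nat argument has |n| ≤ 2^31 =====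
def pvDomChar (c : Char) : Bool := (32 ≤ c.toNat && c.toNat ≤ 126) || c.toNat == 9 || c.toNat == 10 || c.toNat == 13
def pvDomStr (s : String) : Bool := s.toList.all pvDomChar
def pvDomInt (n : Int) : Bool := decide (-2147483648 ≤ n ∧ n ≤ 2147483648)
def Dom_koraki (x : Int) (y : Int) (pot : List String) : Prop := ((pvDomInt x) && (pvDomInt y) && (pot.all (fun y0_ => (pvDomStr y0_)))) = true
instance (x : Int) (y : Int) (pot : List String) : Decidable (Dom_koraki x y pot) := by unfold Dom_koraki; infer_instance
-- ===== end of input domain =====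

-- B replaces A's branch-chain loop over a mutable (x,y) by a delta table, two
-- per-coordinate prefix-sum scans and a zip (objective: alternative, same cost).

-- ===== PORT A =====
-- literal transliteration of A: one loop over pot, if/elif chain mutating (x, y), appending each position
def korakiStep (st : Int × Int × List (Int × Int)) (korak : String) : Int × Int × List (Int × Int) :=
  let x := st.1
  let y := st.2.1
  let acc := st.2.2
  let xy : Int × Int :=
    if korak = "v" then (x, y + 1)
    else if korak = "^" then (x, y - 1)
    else if korak = ">" then (x + 1, y)
    else if korak = "<" then (x - 1, y)
    else (x, y)
  (xy.1, xy.2, acc ++ [(xy.1, xy.2)])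

def koraki (x : Int) (y : Int) (pot : List String) : List (Int × Int) :=
  (pot.foldl korakiStep (x, y, [(x, y)])).2.2

-- ===== PORT B =====
-- B-side helpers (from Source B)
def DELTAS : PySem.Dict String (Int × Int) :=
  PySem.Dict.ofList [("v", (0, 1)), ("^", (0, -1)), (">", (1, 0)), ("<", (-1, 0))]

-- _prefix: out = [start]; cur = start; for d in ds: cur += d; out.append(cur)
def prefixSums (start : Int) (ds : List Int) : List Int :=
  (ds.foldl (fun (st : Int × List Int) d => (st.1 + d, st.2 ++ [st.1 + d])) (start, [start])).2

def koraki_alt (x : Int) (y : Int) (pot : List String) : List (Int × Int) :=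
  let deltas := pot.map (fun k => DELTAS.getD k (0, 0))
  let xs := prefixSums x (deltas.map (fun d => d.1))
  let ys := prefixSums y (deltas.map (fun d => d.2))
  List.zip xs ys

-- ===== PRECONDITION & SPEC =====
def Spec_koraki (x : Int) (y : Int) (pot : List String) (out : List (Int × Int)) : Prop := out = koraki_alt x y pot
instance (x : Int) (y : Int) (pot : List String) (out : List (Int × Int)) : Decidable (Spec_koraki x y pot out) := by unfold Spec_koraki; infer_instance

-- ===== CLAIM (what is proved, stated in full; the proofs are below) =====
def Claim_equal_koraki : Prop := ∀ (x : Int) (y : Int) (pot : List String), Dom_koraki x y pot → Spec_koraki x y pot (koraki x y pot)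

-- ===== LEMMAS AND PROOFS =====

-- reference semantics: the list of positions as a simple structural recursion
def dxy (k : String) : Int × Int :=
  if k = "v" then (0, 1) else if k = "^" then (0, -1)
  else if k = ">" then (1, 0) else if k = "<" then (-1, 0) else (0, 0)

def goSpec (x y : Int) : List String → List (Int × Int)
  | [] => [(x, y)]
  | k :: ks => (x, y) :: goSpec (x + (dxy k).1) (y + (dxy k).2) ks

lemma korakiStep_eq (st : Int × Int × List (Int × Int)) (k : String) :
    korakiStep st k =
      (st.1 + (dxy k).1, st.2.1 + (dxy k).2,
       st.2.2 ++ [(st.1 + (dxy k).1, st.2.1 + (dxy k).2)]) := by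
  unfold korakiStep dxy; split_ifs <;> simp [sub_eq_add_neg]

lemma goSpec_cons_head (x y : Int) (ks : List String) :
    goSpec x y ks = (x, y) :: (goSpec x y ks).tail := by
  cases ks <;> simp [goSpec]

lemma koraki_foldl_inv (pot : List String) (x y : Int) (acc : List (Int × Int)) :
    (pot.foldl korakiStep (x, y, acc)).2.2 = acc ++ (goSpec x y pot).tail := by
  induction pot generalizing x y acc with
  | nil => simp [goSpec]
  | cons k ks ih =>
    rw [List.foldl_cons, korakiStep_eq, ih]
    simp only [goSpec, List.tail_cons]
    conv_rhs => rw [goSpec_cons_head]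
    simp

lemma koraki_eq_goSpec (x y : Int) (pot : List String) :
    koraki x y pot = goSpec x y pot := by
  unfold koraki
  rw [koraki_foldl_inv]
  cases pot <;> simp [goSpec]

-- reference semantics of _prefix
def prefRec (start : Int) : List Int → List Int
  | [] => [start]
  | d :: ds => start :: prefRec (start + d) ds

lemma prefRec_cons_head (s : Int) (ds : List Int) :
    prefRec s ds = s :: (prefRec s ds).tail := by
  cases ds <;> simp [prefRec]

lemma dmk : DELTAS = PySem.Dict.mk [("v", (0, 1)), ("^", (0, -1)), (">", (1, 0)), ("<", (-1, 0))] := by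
  decide

lemma prefixSums_inv (ds : List Int) (cur : Int) (out : List Int) :
    (ds.foldl (fun (st : Int × List Int) d => (st.1 + d, st.2 ++ [st.1 + d])) (cur, out)).2
      = out ++ (prefRec cur ds).tail := by
  induction ds generalizing cur out with
  | nil => simp [prefRec]
  | cons d ds ih =>
    simp only [List.foldl_cons]
    rw [ih]
    conv_rhs => rw [prefRec, List.tail_cons, prefRec_cons_head (cur + d) ds]
    simp

lemma prefixSums_eq_prefRec (start : Int) (ds : List Int) :
    prefixSums start ds = prefRec start ds := by
  unfold prefixSums
  rw [prefixSums_inv]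
  cases ds <;> simp [prefRec]

lemma deltas_getD_eq_dxy (k : String) : DELTAS.getD k (0, 0) = dxy k := by
  by_cases h1 : k = "v"
  · subst h1; decide
  by_cases h2 : k = "^"
  · subst h2; decide
  by_cases h3 : k = ">"
  · subst h3; decide
  by_cases h4 : k = "<"
  · subst h4; decide
  simp [dxy, h1, h2, h3, h4, dmk, PySem.Dict.getD, PySem.Dict.get?,
    Ne.symm h1, Ne.symm h2, Ne.symm h3, Ne.symm h4]

lemma zip_prefRec_eq_goSpec (pot : List String) (x y : Int) :
    List.zip (prefRec x (pot.map (fun k => (dxy k).1)))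
             (prefRec y (pot.map (fun k => (dxy k).2))) = goSpec x y pot := by
  induction pot generalizing x y with
  | nil => simp [prefRec, goSpec]
  | cons k ks ih =>
    simp only [List.map_cons, prefRec, goSpec, List.zip_cons_cons]
    rw [ih]

lemma koraki_alt_eq_goSpec (x y : Int) (pot : List String) :
    koraki_alt x y pot = goSpec x y pot := by
  unfold koraki_alt
  simp only [deltas_getD_eq_dxy, prefixSums_eq_prefRec, List.map_map]
  exact zip_prefRec_eq_goSpec pot x y

-- ===== VERDICT (by name: the statement is the Claim_ definition above) =====
theorem koraki_spec : Claim_equal_koraki := by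
  intro x y pot _
  unfold Spec_koraki
  rw [koraki_eq_goSpec, koraki_alt_eq_goSpec]
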